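-- pv_equiv track=rewrite | github.com/Nalla-Turing/Cryptonite_taskphase2_Mrinal | Extras/RevEngg/crackme/crack.py | reverse_password
-- ===== SOURCE A (Python) =====
-- def reverse_password(output):
--     sVar3 = len(output)  # Length of the output string
--     rounds = 3  # Number of obfuscation rounds
--     original = list(output)  # Start with the output string
--
--     for round in range(rounds - 1, -1, -1):  # Reverse the 3 rounds
--         for i_1 in range(sVar3):  # Process each character
--             uVar1 = (i_1 % 0xff >> 1 & 0x55) + (i_1 % 0xff & 0x55)
--             uVar1 = ((uVar1 >> 2) & 0x33) + (uVar1 & 0x33)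
--             temp_char = ord(original[i_1]) - ord('a')
--             temp_char = (temp_char - ((uVar1 >> 4) + (uVar1 & 0xf))) % 26
--             original[i_1] = chr(temp_char + ord('a'))
--
--     return ''.join(original)
-- ===== SOURCE B (Python) =====
-- def reverse_password(output):
--     # One pass: undoing three identical per-index shifts mod 26 equals one shift by
--     # 3 * popcount(i % 255) (the idiomatic bit_count replaces the SWAR bit-twiddling).
--     return ''.join(chr((ord(c) - ord('a') - 3 * (i % 255).bit_count()) % 26 + ord('a'))
--                    for i, c in enumerate(output))
-- ===== Notes on version B (the rewrite author's own statement) =====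
-- stated objective: simpler
-- what changed: Replaces the 3-iteration outer rounds loop and in-place list mutation by a single comprehension over enumerate(output) that subtracts 3*s once mod 26, and replaces the SWAR bit-twiddling popcount by int.bit_count.
import Mathlib
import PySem

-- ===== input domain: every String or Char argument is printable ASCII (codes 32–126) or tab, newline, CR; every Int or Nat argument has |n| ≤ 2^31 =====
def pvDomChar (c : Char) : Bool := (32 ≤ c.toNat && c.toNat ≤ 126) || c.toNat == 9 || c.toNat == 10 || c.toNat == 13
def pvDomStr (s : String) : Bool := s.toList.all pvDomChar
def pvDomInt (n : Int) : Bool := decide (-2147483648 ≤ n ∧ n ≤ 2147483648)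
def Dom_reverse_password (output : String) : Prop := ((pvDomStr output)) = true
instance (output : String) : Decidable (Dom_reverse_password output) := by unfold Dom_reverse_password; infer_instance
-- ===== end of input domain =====

-- B replaces A's three identical in-place mutation rounds by one pass subtracting 3*popcount(i%255) mod 26 (objective: simpler).

-- ord(c) / chr(n): ported by hand (no PySem primitive); exact since every chr argument
-- this file produces is a valid code point (97..122).  x & y (nonnegative operands here)
-- is ported as Int.land, x >> y as >>> : both exact for nonnegative ints.
def pvOrd (c : Char) : Int := (c.toNat : Int)
def pvChr (n : Int) : Char := Char.ofNat n.toNat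

-- ===== PORT A =====
-- the inner-loop body of A, step for step (uVar1 bit-twiddling, shift, chr, list assignment)
def pvInnerStepA (original : List Char) (i_1 : Int) : List Char :=
  let uVar1 := Int.land ((PySem.Int.mod i_1 0xff) >>> 1) 0x55 + Int.land (PySem.Int.mod i_1 0xff) 0x55
  let uVar1 := Int.land (uVar1 >>> 2) 0x33 + Int.land uVar1 0x33
  let temp_char := pvOrd (PySem.List.pyGetD original i_1 'a') - pvOrd 'a'
  let temp_char := PySem.Int.mod (temp_char - ((uVar1 >>> 4) + Int.land uVar1 0xf)) 26
  PySem.List.pySetD original i_1 (pvChr (temp_char + pvOrd 'a'))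

def reverse_password (output : String) : String :=
  let sVar3 : Int := PySem.Str.len output
  let rounds : Int := 3
  let original : List Char := output.toList
  let original :=
    (PySem.List.pyRange (rounds - 1) (-1) (-1)).foldl
      (fun original _round => (PySem.List.pyRange 0 sVar3 1).foldl pvInnerStepA original)
      original
  String.ofList original

-- ===== PORT B =====
def reverse_password_alt (output : String) : String :=
  String.ofList ((PySem.List.enumerate output.toList 0).map (fun ic =>
    pvChr (PySem.Int.mod (pvOrd ic.2 - pvOrd 'a'
            - 3 * (PySem.Int.bitCount (PySem.Int.mod ic.1 0xff) : Int)) 26 + pvOrd 'a')))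

-- ===== PRECONDITION & SPEC =====
def Spec_reverse_password (output : String) (out : String) : Prop := out = reverse_password_alt output
instance (output : String) (out : String) : Decidable (Spec_reverse_password output out) := by unfold Spec_reverse_password; infer_instance

-- ===== CLAIM (what is proved, stated in full; the proofs are below) =====
def Claim_equal_reverse_password : Prop := ∀ (output : String), Dom_reverse_password output → Spec_reverse_password output (reverse_password output)

-- ===== LEMMAS AND PROOFS =====

-- A's character transform at index i (the value pvInnerStepA writes), abstracted
def pvGA (i : Int) (c : Char) : Char :=
  let uVar1 := Int.land ((PySem.Int.mod i 0xff) >>> 1) 0x55 + Int.land (PySem.Int.mod i 0xff) 0x55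
  let uVar1 := Int.land (uVar1 >>> 2) 0x33 + Int.land uVar1 0x33
  pvChr (PySem.Int.mod (pvOrd c - pvOrd 'a' - ((uVar1 >>> 4) + Int.land uVar1 0xf)) 26 + pvOrd 'a')

theorem pvInnerStepA_eq (l : List Char) (i : Int) :
    pvInnerStepA l i = PySem.List.pySetD l i (pvGA i (PySem.List.pyGetD l i 'a')) := by
  simp [pvInnerStepA, pvGA]

-- A's SWAR bit-twiddling = popcount of i % 255 (finite check over the 255 residues)
set_option maxRecDepth 16384 in
theorem pvSwar_eq_bitCount (i : Int) (hi : 0 ≤ i) :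
    (let u1 := Int.land ((PySem.Int.mod i 0xff) >>> 1) 0x55 + Int.land (PySem.Int.mod i 0xff) 0x55
     let u2 := Int.land (u1 >>> 2) 0x33 + Int.land u1 0x33
     (u2 >>> 4) + Int.land u2 0xf) = (PySem.Int.bitCount (PySem.Int.mod i 0xff) : Int) := by
  have hfin : ∀ n : Fin 255,
      (let u1 := Int.land (((n : Nat) : Int) >>> 1) 0x55 + Int.land ((n : Nat) : Int) 0x55
       let u2 := Int.land (u1 >>> 2) 0x33 + Int.land u1 0x33
       (u2 >>> 4) + Int.land u2 0xf) = (PySem.Int.bitCount ((n : Nat) : Int) : Int) := by decide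
  have hi' : i = ((i.toNat : Nat) : Int) := by omega
  have hmod : PySem.Int.mod ((i.toNat : Nat) : Int) 0xff = ((i.toNat % 255 : Nat) : Int) := by
    exact_mod_cast PySem.Int.mod_natCast i.toNat 255
  rw [hi', hmod]
  exact hfin ⟨i.toNat % 255, by omega⟩

-- chr then ord is the identity on the codes this file produces
theorem pvOrd_pvChr (k : Int) (h1 : 97 ≤ k) (h2 : k < 123) : pvOrd (pvChr k) = k := by
  interval_cases k <;> decide

-- three applications of A's transform = B's one-shot transform
theorem pvGA_triple (i : Int) (hi : 0 ≤ i) (c : Char) :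
    pvGA i (pvGA i (pvGA i c)) =
      pvChr (PySem.Int.mod (pvOrd c - pvOrd 'a'
        - 3 * (PySem.Int.bitCount (PySem.Int.mod i 0xff) : Int)) 26 + pvOrd 'a') := by
  have hm : ∀ a : Int, 0 ≤ PySem.Int.mod a 26 ∧ PySem.Int.mod a 26 < 26 := by
    intro a
    rw [PySem.Int.mod_eq_emod_of_pos (by norm_num)]
    exact ⟨Int.emod_nonneg a (by norm_num), Int.emod_lt_of_pos a (by norm_num)⟩
  have ha : pvOrd 'a' = (97 : Int) := by decide
  have hord : ∀ a : Int, pvOrd (pvChr (PySem.Int.mod a 26 + pvOrd 'a')) = PySem.Int.mod a 26 + pvOrd 'a' := by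
    intro a
    exact pvOrd_pvChr _ (by have := hm a; rw [ha]; omega)
      (by have := hm a; rw [ha]; omega)
  simp only [pvGA, pvSwar_eq_bitCount i hi, hord]
  congr 1
  have e : ∀ a : Int, PySem.Int.mod a 26 = a % 26 := fun a => PySem.Int.mod_eq_emod_of_pos (by norm_num)
  simp only [e, ha]
  omega

-- the inner index loop, started on pre ++ l at index pre.length, rewrites l pointwise
theorem pvLoop_eq_map (g : Int → Char → Char) :
    ∀ (l pre : List Char),
      (PySem.List.pyRange (pre.length : Int) ((pre.length : Int) + l.length) 1).foldl
        (fun env i => PySem.List.pySetD env i (g i (PySem.List.pyGetD env i 'a'))) (pre ++ l)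
      = pre ++ (PySem.List.enumerate l (pre.length : Int)).map (fun p => g p.1 p.2) := by
  intro l
  induction l with
  | nil =>
    intro pre
    rw [PySem.List.pyRange_one_eq_nil (by simp)]
    simp [PySem.List.enumerate_nil]
  | cons c t ih =>
    intro pre
    have hlen : ((pre.length : Int) + ((c :: t).length : Int)) = (pre.length : Int) + (t.length : Int) + 1 := by
      rw [List.length_cons]; push_cast; ring
    rw [hlen, PySem.List.pyRange_one_cons (by omega)]
    simp only [List.foldl_cons]
    have hget : PySem.List.pyGetD (pre ++ c :: t) (pre.length : Int) 'a' = c := by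
      simp [PySem.List.pyGetD_natCast]
    have hset : PySem.List.pySetD (pre ++ c :: t) (pre.length : Int) (g (pre.length : Int) c)
        = (pre ++ [g (pre.length : Int) c]) ++ t := by
      simp [PySem.List.pySetD_natCast]
    rw [hget, hset]
    have ihp := ih (pre ++ [g (pre.length : Int) c])
    have hl2 : (((pre ++ [g (pre.length : Int) c]).length : Int)) = (pre.length : Int) + 1 := by
      simp
    rw [hl2] at ihp
    rw [show (pre.length : Int) + (t.length : Int) + 1 = ((pre.length : Int) + 1) + (t.length : Int) by ring]
    rw [ihp]
    simp [PySem.List.enumerate_cons]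

theorem pvEnumerate_map {α β : Type} (f : α → β) :
    ∀ (xs : List α) (s : Int),
      PySem.List.enumerate (xs.map f) s
        = (PySem.List.enumerate xs s).map (fun p => (p.1, f p.2)) := by
  intro xs
  induction xs with
  | nil => intro s; simp [PySem.List.enumerate_nil]
  | cons x t ih => intro s; simp [PySem.List.enumerate_cons, ih]

theorem pvEnumerate_enumerate {α : Type} :
    ∀ (xs : List α) (s : Int),
      PySem.List.enumerate (PySem.List.enumerate xs s) s
        = (PySem.List.enumerate xs s).map (fun p => (p.1, p)) := by
  intro xs
  induction xs with
  | nil => intro s; simp [PySem.List.enumerate_nil]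
  | cons x t ih => intro s; simp [PySem.List.enumerate_cons, ih]

-- ===== VERDICT (by name: the statement is the Claim_ definition above) =====
theorem reverse_password_spec : Claim_equal_reverse_password := by
  unfold Claim_equal_reverse_password Spec_reverse_password
  intro output _
  simp only [reverse_password, reverse_password_alt]
  have hr3 : PySem.List.pyRange (3 - 1) (-1) (-1) = [2, 1, 0] := by decide
  rw [hr3]
  simp only [List.foldl_cons, List.foldl_nil]
  have hstepf : pvInnerStepA = fun env i => PySem.List.pySetD env i (pvGA i (PySem.List.pyGetD env i 'a')) := by
    funext env i; exact pvInnerStepA_eq env i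
  rw [hstepf]
  set n : Nat := output.toList.length with hn
  have hlen : PySem.Str.len output = (n : Int) := by
    rw [PySem.Str.len_eq, hn]
  rw [hlen]
  have hone : ∀ (l : List Char), l.length = n →
      (PySem.List.pyRange 0 (n : Int) 1).foldl
        (fun env i => PySem.List.pySetD env i (pvGA i (PySem.List.pyGetD env i 'a'))) l
      = (PySem.List.enumerate l 0).map (fun p => pvGA p.1 p.2) := by
    intro l hl
    have h := pvLoop_eq_map pvGA l []
    simp only [List.length_nil, Nat.cast_zero, zero_add, List.nil_append] at h
    rw [hl] at h
    exact h
  have e1 := hone output.toList rfl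
  rw [e1]
  have e2 := hone ((PySem.List.enumerate output.toList 0).map (fun p => pvGA p.1 p.2)) (by simp [hn])
  rw [e2]
  have e3 := hone ((PySem.List.enumerate ((PySem.List.enumerate output.toList 0).map
      (fun p => pvGA p.1 p.2)) 0).map (fun p => pvGA p.1 p.2)) (by simp [hn])
  rw [e3]
  simp only [pvEnumerate_map, pvEnumerate_enumerate, List.map_map]
  congr 1
  apply List.map_congr_left
  intro p hp
  have hp1 : 0 ≤ p.1 := by
    rcases (PySem.List.mem_enumerate_iff _ _ _).1 hp with ⟨k, hk, rfl⟩
    simp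
  simpa using pvGA_triple p.1 hp1 p.2
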